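-- pv_equiv track=rewrite | github.com/FranciscoMoretti/coding-challenges | codejam2019/foregone_solution.py | splitFours
-- ===== SOURCE A (Python) =====
-- def splitFours(number):
--     snum = list(str(number))
--     B = 0
--     for i in range(len(snum)):
--         if snum[i] == '4':
--             snum[i] = '2'
--             B += 2*pow(10, len(snum)-i-1)
--     return [int("".join(snum)), B]
-- ===== SOURCE B (Python) =====
-- def splitFours(number):
--     result = int(str(number).replace('4', '2'))
--     mask, p, m = 0, 1, abs(number)
--     while m:
--         if m % 10 == 4:
--             mask += 2 * p
--         m //= 10
--         p *= 10
--     return [result, mask]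
-- ===== Notes on version B (the rewrite author's own statement) =====
-- stated objective: alternative
-- what changed: B computes the mask purely arithmetically by a divmod-by-10 loop over abs(number) (no string positions, no per-index pow) and the first value with a single str.replace('4','2'), instead of A's one indexed pass that mutates a char list and sums 2*pow(10,len-i-1).
import Mathlib
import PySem

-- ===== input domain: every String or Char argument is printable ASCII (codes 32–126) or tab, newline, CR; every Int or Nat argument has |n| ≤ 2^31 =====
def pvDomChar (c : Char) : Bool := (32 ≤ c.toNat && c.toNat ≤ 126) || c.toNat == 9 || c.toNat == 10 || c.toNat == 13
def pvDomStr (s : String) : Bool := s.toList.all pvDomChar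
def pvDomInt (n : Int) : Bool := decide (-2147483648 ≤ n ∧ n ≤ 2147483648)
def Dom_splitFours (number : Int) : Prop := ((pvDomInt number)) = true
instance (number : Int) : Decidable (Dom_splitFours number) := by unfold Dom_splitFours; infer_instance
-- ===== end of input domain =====

-- B computes the mask arithmetically by a divmod-by-10 loop over abs(number) and the first
-- value with one str.replace, instead of A's indexed char-list pass (alternative, same cost).

-- ===== PORT A =====
-- snum[i] is read with getD ' ': i ranges over range(len(snum)) so it is always in range (exact).
-- int("".join(snum)) is ported as (ofChars? …).getD 0: the joined string is always a valid
-- integer literal (the digits of str(number) with '4' replaced by '2'), so Python's int()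
-- never raises here and the default is never used.
def splitFours (number : Int) : List Int :=
  let snum := (PySem.Int.toStr number).toList
  let st := (List.range snum.length).foldl
    (fun (st : List Char × Int) i =>
      if st.1.getD i ' ' = '4' then
        (st.1.set i '2', st.2 + 2 * (10 : Int) ^ (st.1.length - i - 1))
      else st) (snum, (0 : Int))
  [(PySem.Int.ofChars? st.1).getD 0, st.2]

-- ===== PORT B =====
-- B's while-loop over m, mask, p.  m = abs(number) ≥ 0 throughout, so it is carried as a Nat:
-- Python's m % 10 and m //= 10 coincide with Nat's % and / on nonnegative m (exact), and the
-- 'while m:' guard is m ≠ 0.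
def pvBloop (m : Nat) (mask p : Int) : Int :=
  if m = 0 then mask
  else pvBloop (m / 10) (if m % 10 = 4 then mask + 2 * p else mask) (p * 10)
  decreasing_by exact Nat.div_lt_self (Nat.pos_of_ne_zero (by assumption)) (by norm_num)

-- int(str(number).replace('4','2')) is ported as (ofChars? (Chars.replace …)).getD 0: the
-- replaced string is always a valid integer literal, so int() never raises and the default
-- is never used.
def splitFours_alt (number : Int) : List Int :=
  let result := (PySem.Int.ofChars? (PySem.Chars.replace (PySem.Int.toStr number).toList ['4'] ['2'])).getD 0
  [result, pvBloop number.natAbs 0 1]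

-- ===== PRECONDITION & SPEC =====
def Spec_splitFours (number : Int) (out : List Int) : Prop := out = splitFours_alt number
instance (number : Int) (out : List Int) : Decidable (Spec_splitFours number out) := by unfold Spec_splitFours; infer_instance

-- ===== CLAIM (what is proved, stated in full; the proofs are below) =====
def Claim_equal_splitFours : Prop := ∀ (number : Int), Dom_splitFours number → Spec_splitFours number (splitFours number)

-- ===== LEMMAS AND PROOFS =====

-- the digit substitution A performs
def pvF4 (c : Char) : Char := if c = '4' then '2' else c

-- the mask of a digit string: 2·10^(position from the right) for every '4'
def pvMaskD : List Char → Int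
  | [] => 0
  | c :: t => (if c = '4' then 2 * (10 : Int) ^ t.length else 0) + pvMaskD t

-- A's loop: after the first n steps the list is s with its first n characters substituted and
-- the accumulator is the sum of 2·10^(len-i-1) over the positions i < n holding '4'
theorem pvA_fold_inv (s : List Char) (n : Nat) (hn : n ≤ s.length) :
    (List.range n).foldl
      (fun (st : List Char × Int) i =>
        if st.1.getD i ' ' = '4' then
          (st.1.set i '2', st.2 + 2 * (10 : Int) ^ (st.1.length - i - 1))
        else st) (s, (0 : Int))
    = ((s.take n).map pvF4 ++ s.drop n,
       ∑ i ∈ Finset.range n, (if s.getD i ' ' = '4' then 2 * (10 : Int) ^ (s.length - i - 1) else 0)) := by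
  induction n with
  | zero => simp
  | succ n ih =>
    have hn' : n < s.length := hn
    rw [List.range_succ, List.foldl_append, ih (Nat.le_of_lt hn'), List.foldl_cons, List.foldl_nil]
    have hlen : ((s.take n).map pvF4 ++ s.drop n).length = s.length := by
      simp [Nat.min_eq_left (Nat.le_of_lt hn')]; omega
    have hltake : ((s.take n).map pvF4).length = n := by
      simp [Nat.min_eq_left (Nat.le_of_lt hn')]
    have hget : ((s.take n).map pvF4 ++ s.drop n).getD n ' ' = s.getD n ' ' := by
      rw [List.getD_eq_getElem?_getD, List.getElem?_append_right (by omega), hltake]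
      simp only [Nat.sub_self]
      rw [List.getElem?_drop, Nat.add_zero, ← List.getD_eq_getElem?_getD]
    have hdrop : s.drop n = s[n] :: s.drop (n + 1) := List.drop_eq_getElem_cons hn'
    have htake : s.take (n + 1) = s.take n ++ [s[n]] := by
      rw [List.take_add_one, List.getElem?_eq_getElem hn']; rfl
    have hgetn : s.getD n ' ' = s[n] := by
      rw [List.getD_eq_getElem?_getD, List.getElem?_eq_getElem hn']; rfl
    rw [Finset.sum_range_succ]
    by_cases h4 : s.getD n ' ' = '4'
    · rw [if_pos (by rw [hget]; exact h4), if_pos h4]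
      have hsn : s[n] = '4' := by rw [← hgetn]; exact h4
      refine Prod.ext ?_ (by rw [hlen])
      show (List.map pvF4 (List.take n s) ++ List.drop n s).set n '2'
          = List.map pvF4 (List.take (n+1) s) ++ List.drop (n+1) s
      calc (List.map pvF4 (List.take n s) ++ List.drop n s).set n '2'
          = (List.map pvF4 (List.take n s) ++ s[n] :: List.drop (n+1) s).set n '2' := by
            rw [← hdrop]
        _ = List.map pvF4 (List.take n s) ++ '2' :: List.drop (n+1) s := by
            rw [List.set_append_right _ _ (by omega), hltake, Nat.sub_self, List.set_cons_zero]
        _ = List.map pvF4 (List.take (n+1) s) ++ List.drop (n+1) s := by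
            rw [htake, List.map_append]; simp [pvF4, hsn]
    · rw [if_neg (by rw [hget]; exact h4), if_neg h4]
      refine Prod.ext ?_ (by simp)
      simp only []
      rw [htake, List.map_append, hdrop]
      have : List.map pvF4 [s[n]] = [s[n]] := by
        simp [pvF4]; intro hh; rw [← hgetn] at hh; exact absurd hh h4
      rw [this, List.append_assoc, List.singleton_append]

-- A's positional sum in closed form: the mask of the string
theorem pvSum_eq_maskD (s : List Char) :
    (∑ i ∈ Finset.range s.length, (if s.getD i ' ' = '4' then 2 * (10 : Int) ^ (s.length - i - 1) else 0))
    = pvMaskD s := by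
  induction s with
  | nil => simp [pvMaskD]
  | cons c t ih =>
    rw [List.length_cons, Finset.sum_range_succ', pvMaskD]
    simp only [List.getD_cons_succ, List.getD_cons_zero]
    rw [← ih, add_comm]
    congr 1
    refine Finset.sum_congr rfl (fun i hi => ?_)
    have : t.length + 1 - (i + 1) - 1 = t.length - i - 1 := by omega
    rw [this]

-- appending one character multiplies every weight by 10
theorem pvMaskD_append (ds : List Char) (c : Char) :
    pvMaskD (ds ++ [c]) = 10 * pvMaskD ds + (if c = '4' then 2 else 0) := by
  induction ds with
  | nil => simp [pvMaskD]
  | cons d t ih =>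
    simp only [List.cons_append, pvMaskD, ih, List.length_append, List.length_cons,
      List.length_nil]
    split_ifs <;> ring

-- Nat.toDigitsCore builds onto its accumulator
theorem pv_tdc_acc (f : Nat) : ∀ (n : Nat) (ds : List Char),
    Nat.toDigitsCore 10 f n ds = Nat.toDigitsCore 10 f n [] ++ ds := by
  induction f with
  | zero => intro n ds; simp [Nat.toDigitsCore]
  | succ f ih =>
    intro n ds
    simp only [Nat.toDigitsCore]
    by_cases h : n / 10 = 0
    · simp [h]
    · simp only [h, if_false]
      rw [ih (n / 10) (Nat.digitChar (n % 10) :: ds), ih (n / 10) [Nat.digitChar (n % 10)]]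
      simp

-- the fuel does not matter once it exceeds the number
theorem pv_tdc_fuel (n : Nat) : ∀ (f₁ f₂ : Nat), n < f₁ → n < f₂ →
    Nat.toDigitsCore 10 f₁ n [] = Nat.toDigitsCore 10 f₂ n [] := by
  induction n using Nat.strong_induction_on with
  | _ n ih =>
    intro f₁ f₂ h₁ h₂
    obtain ⟨g₁, rfl⟩ := Nat.exists_eq_succ_of_ne_zero (by omega : f₁ ≠ 0)
    obtain ⟨g₂, rfl⟩ := Nat.exists_eq_succ_of_ne_zero (by omega : f₂ ≠ 0)
    simp only [Nat.toDigitsCore]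
    by_cases h : n / 10 = 0
    · simp [h]
    · have hpos : 0 < n := by
        rcases Nat.eq_zero_or_pos n with h0 | h0
        · subst h0; simp at h
        · exact h0
      have hlt : n / 10 < n := Nat.div_lt_self hpos (by norm_num)
      simp only [h, if_false]
      rw [pv_tdc_acc g₁ (n / 10), pv_tdc_acc g₂ (n / 10),
        ih (n / 10) hlt g₁ g₂ (by omega) (by omega)]

theorem pv_toDigits_lt (m : Nat) (h : m < 10) : Nat.toDigits 10 m = [Nat.digitChar m] := by
  simp [Nat.toDigits, Nat.toDigitsCore, Nat.div_eq_of_lt h, Nat.mod_eq_of_lt h]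

theorem pv_toDigits_ge (m : Nat) (h : 10 ≤ m) :
    Nat.toDigits 10 m = Nat.toDigits 10 (m / 10) ++ [Nat.digitChar (m % 10)] := by
  have hne : m / 10 ≠ 0 := by
    have := Nat.div_pos h (by norm_num)
    omega
  have hne' : ¬ m / 10 = 0 := hne
  rw [Nat.toDigits]
  conv_lhs => rw [show m + 1 = (m) + 1 from rfl]
  simp only [Nat.toDigitsCore, hne', if_false]
  rw [pv_tdc_acc m (m / 10)]
  congr 1
  have hlt : m / 10 < m := Nat.div_lt_self (by omega) (by norm_num)
  rw [Nat.toDigits]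
  exact pv_tdc_fuel (m / 10) m (m / 10 + 1) (by omega) (by omega)

theorem pv_digitChar_four {d : Nat} (h : d < 10) : (Nat.digitChar d = '4') ↔ d = 4 := by
  interval_cases d <;> simp [Nat.digitChar]

-- B's loop computes exactly the mask of the decimal digit string of m
theorem pvBloop_eq (m : Nat) : ∀ (mask p : Int),
    pvBloop m mask p = mask + p * pvMaskD (Nat.toDigits 10 m) := by
  induction m using Nat.strong_induction_on with
  | _ m ih =>
    intro mask p
    by_cases h0 : m = 0
    · subst h0
      rw [pvBloop]
      have h1 : pvMaskD (Nat.toDigits 10 0) = 0 := by decide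
      rw [h1]; simp
    · rw [pvBloop, if_neg h0]
      have hlt : m / 10 < m := Nat.div_lt_self (Nat.pos_of_ne_zero h0) (by norm_num)
      rw [ih (m / 10) hlt]
      by_cases h10 : m < 10
      · have hq : m / 10 = 0 := Nat.div_eq_of_lt h10
        have hr : m % 10 = m := Nat.mod_eq_of_lt h10
        rw [hq, hr, pv_toDigits_lt m h10,
          pv_toDigits_lt 0 (by norm_num)]
        simp only [pvMaskD, List.length_nil, pow_zero]
        have h4 : (Nat.digitChar m = '4') ↔ m = 4 := pv_digitChar_four h10
        by_cases hm4 : m = 4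
        · simp [hm4, Nat.digitChar]; ring
        · rw [if_neg hm4, if_neg (fun hh => hm4 (h4.mp hh))]
          simp [Nat.digitChar]
      · rw [pv_toDigits_ge m (by omega), pvMaskD_append]
        have h4 : (Nat.digitChar (m % 10) = '4') ↔ m % 10 = 4 :=
          pv_digitChar_four (Nat.mod_lt m (by norm_num))
        by_cases hm4 : m % 10 = 4
        · rw [if_pos hm4, if_pos (h4.mpr hm4)]; ring
        · rw [if_neg hm4, if_neg (fun hh => hm4 (h4.mp hh))]; ring

-- replace with a single-character pattern is a character map
theorem pvReplace_go (l : List Char) (fuel : Nat) (acc : List Char) (h : l.length ≤ fuel) :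
    PySem.Chars.replace.go ['4'] ['2'] fuel l acc = acc.reverse ++ l.map pvF4 := by
  induction l generalizing fuel acc with
  | nil =>
    cases fuel <;> simp [PySem.Chars.replace.go]
  | cons c t ih =>
    cases fuel with
    | zero => simp at h
    | succ m =>
      rw [PySem.Chars.replace.go]
      have hm : t.length ≤ m := by simpa using h
      by_cases hc : c = '4'
      · subst hc
        have hp : List.isPrefixOf ['4'] ('4' :: t) = true := by simp [List.isPrefixOf]
        simp only [hp, if_true, List.length_cons, List.length_nil, Nat.zero_add,
          List.drop_succ_cons, List.drop_zero, List.reverse_cons, List.reverse_nil,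
          List.nil_append]
        rw [List.singleton_append, ih m ('2' :: acc) hm]
        simp [pvF4]
      · have hp : List.isPrefixOf ['4'] (c :: t) = false := by
          simp only [List.isPrefixOf, Bool.and_true, beq_eq_false_iff_ne, ne_eq]
          exact fun hh => hc hh.symm
        simp only [hp, Bool.false_eq_true, if_false]
        rw [ih m (c :: acc) hm]
        simp [pvF4, hc]

theorem pvReplace_eq_map (s : List Char) :
    PySem.Chars.replace s ['4'] ['2'] = s.map pvF4 := by
  rw [PySem.Chars.replace]
  simp [pvReplace_go s s.length [] le_rfl]

-- the mask of str(number) is the mask of the digits of |number| (a leading '-' is never '4')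
theorem pvMaskD_toChars (number : Int) :
    pvMaskD (PySem.Int.toChars number) = pvMaskD (Nat.toDigits 10 number.natAbs) := by
  rw [PySem.Int.toChars]
  by_cases h : number < 0
  · rw [if_pos h, pvMaskD]
    have hm : ¬ ('-' = '4') := by decide
    simp [hm]
  · rw [if_neg h]
    have h2 : number.toNat = number.natAbs := by omega
    rw [h2]

-- ===== VERDICT (by name: the statement is the Claim_ definition above) =====
theorem splitFours_spec : Claim_equal_splitFours := by
  intro number _
  unfold Spec_splitFours splitFours splitFours_alt
  dsimp only
  rw [PySem.Int.toList_toStr]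
  rw [pvA_fold_inv (PySem.Int.toChars number) (PySem.Int.toChars number).length le_rfl]
  rw [pvReplace_eq_map, pvSum_eq_maskD, pvBloop_eq, pvMaskD_toChars]
  simp
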